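-- pv_equiv track=rewrite | github.com/vislearn/Gaussianization-Bound | gaussianization/utils/sacred/sacred_helper.py | apply_cr_to_lines
-- ===== SOURCE A (Python) =====
-- def apply_cr_to_lines(text: str) -> str:
--     """
--     Output filter to remove text before last carriage return in each line.
--     """
--     lines = []
--     for line in text.split("\n"):
--         try:
--             last_cr = line.rindex("\r")
--             line = line[last_cr + 1:]
--         except ValueError:
--             pass
--         lines.append(line)
--     return "\n".join(lines)
-- ===== SOURCE B (Python) =====
-- def apply_cr_to_lines(text: str) -> str:
--     """Single left-to-right character scan: reset the current segment on '\r',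
--     flush it on '\n' — no split/rindex/slice/join machinery."""
--     out = ""
--     seg = ""
--     for ch in text:
--         if ch == "\r":
--             seg = ""
--         elif ch == "\n":
--             out += seg + "\n"
--             seg = ""
--         else:
--             seg += ch
--     return out + seg
-- ===== Notes on version B (the rewrite author's own statement) =====
-- stated objective: alternative
-- what changed: Replaced A's per-line split/rindex/slice/join pipeline with a single left-to-right character scan that resets the current segment at each carriage return and flushes it at each newline.
import Mathlib
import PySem

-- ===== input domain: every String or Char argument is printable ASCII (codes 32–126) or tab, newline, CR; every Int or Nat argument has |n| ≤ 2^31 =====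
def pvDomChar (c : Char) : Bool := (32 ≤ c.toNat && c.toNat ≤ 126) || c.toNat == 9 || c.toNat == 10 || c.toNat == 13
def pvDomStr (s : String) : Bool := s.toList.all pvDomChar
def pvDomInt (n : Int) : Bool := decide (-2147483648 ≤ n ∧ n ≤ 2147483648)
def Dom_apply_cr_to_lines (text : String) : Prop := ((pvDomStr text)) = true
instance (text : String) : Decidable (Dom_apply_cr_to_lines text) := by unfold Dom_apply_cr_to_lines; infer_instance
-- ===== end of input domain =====

-- B replaces A's split-on-'\n' / rindex('\r') / slice / join pipeline by one left-to-right
-- character scan (objective: alternative).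

-- ===== PORT A =====
-- per-line body of A's loop: try line.rindex("\r") → slice; except ValueError → keep line
-- (rindex = rfind, and the ValueError A catches occurs exactly when rfind = -1)
def pvProcLineA (line : List Char) : List Char :=
  let last_cr := PySem.Chars.rfind line ['\r']
  if last_cr = -1 then line
  else PySem.Chars.slice line (some (last_cr + 1)) none

def apply_cr_to_lines (text : String) : String :=
  let lines := (PySem.Chars.splitOn text.toList ['\n']).map pvProcLineA
  String.ofList (PySem.Chars.join ['\n'] lines)

-- ===== PORT B =====
-- B's loop state: (output built so far, current segment since the last '\r' / line start)
def pvAltStep (st : List Char × List Char) (ch : Char) : List Char × List Char :=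
  if ch = '\r' then (st.1, [])
  else if ch = '\n' then (st.1 ++ st.2 ++ ['\n'], [])
  else (st.1, st.2 ++ [ch])

def apply_cr_to_lines_alt (text : String) : String :=
  let st := text.toList.foldl pvAltStep ([], [])
  String.ofList (st.1 ++ st.2)

-- ===== PRECONDITION & SPEC =====
def Spec_apply_cr_to_lines (text : String) (out : String) : Prop := out = apply_cr_to_lines_alt text
instance (text : String) (out : String) : Decidable (Spec_apply_cr_to_lines text out) := by unfold Spec_apply_cr_to_lines; infer_instance

-- ===== CLAIM (what is proved, stated in full; the proofs are below) =====
def Claim_equal_apply_cr_to_lines : Prop := ∀ (text : String), Dom_apply_cr_to_lines text → Spec_apply_cr_to_lines text (apply_cr_to_lines text)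

-- ===== LEMMAS AND PROOFS =====

-- suffix of l after its last '\r' (l itself if there is none)
def pvLastSeg (l : List Char) : List Char := (l.reverse.takeWhile (fun c => c != '\r')).reverse

-- split at '\n': (first piece, remaining pieces)
def pvSplitNL : List Char → List Char × List (List Char)
  | [] => ([], [])
  | c :: t => if c = '\n' then ([], (pvSplitNL t).1 :: (pvSplitNL t).2)
              else (c :: (pvSplitNL t).1, (pvSplitNL t).2)

-- functional form of B's scan
def pvG (seg : List Char) : List Char → List Char
  | [] => seg
  | c :: t => if c = '\r' then pvG [] t
              else if c = '\n' then seg ++ '\n' :: pvG [] t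
              else pvG (seg ++ [c]) t

theorem pvLastSeg_no_cr (l : List Char) (h : '\r' ∉ l) : pvLastSeg l = l := by
  unfold pvLastSeg
  rw [List.takeWhile_eq_self_iff.mpr, List.reverse_reverse]
  intro c hc
  simp only [ne_eq, bne_iff_ne]
  exact fun e => h (e ▸ (List.mem_reverse.mp hc))

theorem pvLastSeg_append_cr (xs ys : List Char) : pvLastSeg (xs ++ '\r' :: ys) = pvLastSeg ys := by
  unfold pvLastSeg
  rw [List.reverse_append, List.reverse_cons, List.append_assoc, List.takeWhile_append]
  split
  · have h2 : List.takeWhile (fun c => c != '\r') ys.reverse = ys.reverse :=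
      (List.takeWhile_prefix _).eq_of_length ‹_›
    simp [h2]
  · rfl

theorem pv_rfind_go_none (l : List Char) (h : '\r' ∉ l) :
    ∀ j, PySem.Chars.rfind.go l ['\r'] j = -1 := by
  intro j
  induction j with
  | zero =>
    rw [PySem.Chars.rfind.go]
    split
    · rename_i hp
      exfalso
      have hm := (List.isPrefixOf_iff_prefix.mp hp).subset (List.mem_singleton_self _)
      exact h hm
    · rfl
  | succ j ih =>
    rw [PySem.Chars.rfind.go]
    split
    · rename_i hp
      exfalso
      have hm := (List.isPrefixOf_iff_prefix.mp hp).subset (List.mem_singleton_self _)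
      exact h (List.mem_of_mem_drop hm)
    · exact ih

theorem pv_rfind_go_last (xs ys : List Char) (h : '\r' ∉ ys) :
    ∀ n, xs.length + n ≤ (xs ++ '\r' :: ys).length →
      PySem.Chars.rfind.go (xs ++ '\r' :: ys) ['\r'] (xs.length + n) = xs.length := by
  intro n
  induction n with
  | zero =>
    intro _
    simp only [Nat.add_zero]
    cases hx : xs.length with
    | zero =>
      have hxe : xs = [] := List.length_eq_zero_iff.mp hx
      subst hxe
      rw [PySem.Chars.rfind.go]
      simp [List.isPrefixOf]
    | succ m =>
      rw [PySem.Chars.rfind.go]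
      have hd : List.drop (m + 1) (xs ++ '\r' :: ys) = '\r' :: ys := by
        rw [← hx]; exact List.drop_left
      rw [hd]
      simp [List.isPrefixOf]
  | succ n ih =>
    intro hle
    have hsh : xs.length + (n + 1) = (xs.length + n) + 1 := by omega
    rw [hsh, PySem.Chars.rfind.go]
    have hd : List.drop (xs.length + n + 1) (xs ++ '\r' :: ys) = List.drop n ys := by
      rw [show xs.length + n + 1 = xs.length + (n + 1) by omega, List.drop_append,
        List.drop_of_length_le (by omega), List.nil_append,
        show xs.length + (n + 1) - xs.length = n + 1 by omega, List.drop_succ_cons]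
    rw [hd]
    split
    · rename_i hp
      exfalso
      exact h (List.mem_of_mem_drop ((List.isPrefixOf_iff_prefix.mp hp).subset (List.mem_singleton_self _)))
    · exact ih (by omega)

theorem pv_decomp (l : List Char) (h : '\r' ∈ l) :
    ∃ xs ys, l = xs ++ '\r' :: ys ∧ '\r' ∉ ys := by
  induction l with
  | nil => cases h
  | cons c t ih =>
    by_cases ht : '\r' ∈ t
    · obtain ⟨xs, ys, rfl, hy⟩ := ih ht
      exact ⟨c :: xs, ys, rfl, hy⟩
    · have hc : c = '\r' := by
        rcases List.mem_cons.mp h with h1 | h2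
        · exact h1.symm
        · exact absurd h2 ht
      exact ⟨[], t, by rw [hc]; rfl, ht⟩

theorem pvProcLineA_eq (l : List Char) : pvProcLineA l = pvLastSeg l := by
  unfold pvProcLineA PySem.Chars.rfind
  by_cases h : '\r' ∈ l
  · obtain ⟨xs, ys, rfl, hy⟩ := pv_decomp l h
    have hlen : (xs ++ '\r' :: ys).length = xs.length + (ys.length + 1) := by
      simp [List.length_append]
    rw [hlen, pv_rfind_go_last xs ys hy (ys.length + 1) (by simp [List.length_append])]
    rw [if_neg (by omega)]
    rw [PySem.Chars.slice_eq_listSlice,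
      show (xs.length : Int) + 1 = ((xs.length + 1 : Nat) : Int) by push_cast; ring,
      PySem.List.slice_from _ (by positivity)]
    rw [Int.toNat_natCast]
    rw [show List.drop (xs.length + 1) (xs ++ '\r' :: ys) = ys by
      rw [List.drop_append, List.drop_of_length_le (by omega), List.nil_append,
        show xs.length + 1 - xs.length = 1 by omega, List.drop_succ_cons, List.drop_zero]]
    rw [pvLastSeg_append_cr, pvLastSeg_no_cr ys hy]
  · rw [pv_rfind_go_none l h, if_pos rfl, pvLastSeg_no_cr l h]

theorem pv_splitOn_go (l : List Char) : ∀ (fuel : Nat) (cur : List Char) (acc : List (List Char)),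
    l.length < fuel →
    PySem.Chars.splitOn.go ['\n'] fuel l cur acc
      = acc.reverse ++ (cur.reverse ++ (pvSplitNL l).1) :: (pvSplitNL l).2 := by
  induction l with
  | nil =>
    intro fuel cur acc hf
    cases fuel with
    | zero => omega
    | succ f =>
      rw [PySem.Chars.splitOn.go]
      · simp [pvSplitNL]
      · omega
  | cons c t ih =>
    intro fuel cur acc hf
    cases fuel with
    | zero => omega
    | succ f =>
      rw [PySem.Chars.splitOn.go]
      by_cases hc : c = '\n'
      · subst hc
        rw [if_pos (by simp [List.isPrefixOf])]
        rw [show List.drop ['\n'].length ('\n' :: t) = t from rfl]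
        rw [ih f [] (cur.reverse :: acc) (by simp at hf; omega)]
        simp [pvSplitNL]
      · rw [if_neg (by simp [List.isPrefixOf]; exact fun h => hc h.symm)]
        rw [ih f (c :: cur) acc (by simp at hf; omega)]
        simp [pvSplitNL, hc]

theorem pvG_join (cs : List Char) : ∀ seg, '\r' ∉ seg →
    pvG seg cs = PySem.Chars.join ['\n']
      (pvLastSeg (seg ++ (pvSplitNL cs).1) :: (pvSplitNL cs).2.map pvLastSeg) := by
  induction cs with
  | nil =>
    intro seg hs
    simp [pvG, pvSplitNL, PySem.Chars.join_singleton, pvLastSeg_no_cr seg hs]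
  | cons c t ih =>
    intro seg hs
    by_cases hr : c = '\r'
    · subst hr
      rw [show pvG seg ('\r' :: t) = pvG [] t from by simp [pvG]]
      rw [ih [] (by simp)]
      have h1 : pvSplitNL ('\r' :: t) = ('\r' :: (pvSplitNL t).1, (pvSplitNL t).2) := by
        simp [pvSplitNL]
      rw [h1]
      simp only [List.nil_append]
      rw [pvLastSeg_append_cr seg (pvSplitNL t).1]
    · by_cases hn : c = '\n'
      · subst hn
        rw [show pvG seg ('\n' :: t) = seg ++ '\n' :: pvG [] t from by simp [pvG]]
        rw [ih [] (by simp)]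
        have h1 : pvSplitNL ('\n' :: t) = ([], (pvSplitNL t).1 :: (pvSplitNL t).2) := by
          simp [pvSplitNL]
        rw [h1]
        simp only [List.append_nil, List.map_cons, List.nil_append]
        rw [PySem.Chars.join_cons_cons, pvLastSeg_no_cr seg hs]
        simp
      · rw [show pvG seg (c :: t) = pvG (seg ++ [c]) t from by simp [pvG, hr, hn]]
        rw [ih (seg ++ [c]) (by simp [hs]; exact fun h => hr h.symm)]
        have h1 : pvSplitNL (c :: t) = (c :: (pvSplitNL t).1, (pvSplitNL t).2) := by
          simp [pvSplitNL, hn]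
        rw [h1]
        simp [List.append_assoc]

theorem pv_foldl_alt (cs : List Char) : ∀ out seg,
    (cs.foldl pvAltStep (out, seg)).1 ++ (cs.foldl pvAltStep (out, seg)).2 = out ++ pvG seg cs := by
  induction cs with
  | nil => intro out seg; simp [pvG]
  | cons c t ih =>
    intro out seg
    by_cases hr : c = '\r'
    · subst hr
      simp only [List.foldl_cons]
      rw [show pvAltStep (out, seg) '\r' = (out, []) from by simp [pvAltStep], ih]
      simp [pvG]
    · by_cases hn : c = '\n'
      · subst hn
        simp only [List.foldl_cons]
        rw [show pvAltStep (out, seg) '\n' = (out ++ seg ++ ['\n'], []) from by simp [pvAltStep], ih]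
        simp [pvG]
      · simp only [List.foldl_cons]
        rw [show pvAltStep (out, seg) c = (out, seg ++ [c]) from by simp [pvAltStep, hr, hn], ih]
        simp [pvG, hr, hn]

-- ===== VERDICT (by name: the statement is the Claim_ definition above) =====
theorem apply_cr_to_lines_spec : Claim_equal_apply_cr_to_lines := by
  intro text _
  have key : PySem.Chars.join ['\n'] ((PySem.Chars.splitOn text.toList ['\n']).map pvProcLineA)
      = (text.toList.foldl pvAltStep ([], [])).1 ++ (text.toList.foldl pvAltStep ([], [])).2 := by
    rw [PySem.Chars.splitOn, pv_splitOn_go text.toList (text.toList.length + 1) [] [] (by omega)]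
    rw [pv_foldl_alt text.toList [] []]
    simp only [List.reverse_nil, List.nil_append, List.map_cons, funext pvProcLineA_eq]
    rw [pvG_join text.toList [] (by simp)]
    simp
  exact congrArg String.ofList key
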